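/- GENERATED by farm/mkstatement.py from design/units.tsv (unit `start_decoder.F5d`) and the assertions of Vorbis/Spec/StartDecoderF5.lean — do not edit.
   THE STATEMENT of the proof unit `start_decoder.F5d`: segment F5d of `start_decoder` (12 instructions; entries 0x1156e6;
   exits 0x115714,0x1156c8; ranges 0x1156e6-0x115712)
   takes each of its entry assertions to one of its exit assertions (`Vorbis.Spec.StartDecoder.SegF5d`), given the contracts of its callees.
   What the names mean: Vorbis/Spec/Basic.lean (the shared hypotheses), Vorbis/Spec/StartDecoderF5.lean (the assertions). The theorem to prove:
   `theorem start_decoder_F5d_ok : Vorbis.Spec.start_decoder_F5d.Statement`. -/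
import Vorbis.Spec.StartDecoderF5
namespace Vorbis.Spec.start_decoder_F5d
open X86 X86.User Asan

/-- The statement of unit `start_decoder.F5d`. -/
def Statement : Prop :=
  ∀ (Lay : Layout) (_hLay : Lay.hi = 0x1000000) (μ : Microarch) (_hμ : UserX.MicroOK μ) (u₀ : State)
    (_hcode : HasCodeNat Lay u₀ Vorbis.L.start_decoder.entry Vorbis.Code.code_start_decoder.nat Vorbis.L.start_decoder.size)
    (_h_asan_load1_noabort : Asan.SmallCheck Lay μ Vorbis.WayInv (Vorbis.CodeOK u₀) [.rax, .rdx] 1 Vorbis.L.__asan_load1_noabort.entry),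
    Vorbis.Spec.StartDecoder.SegF5d Lay μ u₀

end Vorbis.Spec.start_decoder_F5d
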